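-- pv_equiv track=rewrite | github.com/KUDewmina/Python-Programming | Matrix Assigning/Row wise2.py | fill_matrix_row_wise
-- ===== SOURCE A (Python) =====
-- def fill_matrix_row_wise(values, rows):
--     cols = (len(values) + rows - 1) // rows  # Calculate number of columns needed
--     matrix = [['' for _ in range(cols)] for _ in range(rows)]
--
--     for idx, val in enumerate(values):
--         row = idx // cols
--         col = idx % cols
--         matrix[row][col] = val
--
--     return matrix
-- ===== SOURCE B (Python) =====
-- def fill_matrix_row_wise(values, rows):
--     cols = (len(values) + rows - 1) // rows  # same column count as A
--     result = []
--     for r in range(rows):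
--         chunk = values[r * cols:(r + 1) * cols]
--         result.append(list(chunk) + [''] * (cols - len(chunk)))
--     return result
-- ===== Notes on version B (the rewrite author's own statement) =====
-- stated objective: simpler
-- what changed: Builds each row directly as a slice of the value list padded with '' instead of allocating an all-'' matrix and scattering every value into it via idx//cols and idx%cols.
import Mathlib
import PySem

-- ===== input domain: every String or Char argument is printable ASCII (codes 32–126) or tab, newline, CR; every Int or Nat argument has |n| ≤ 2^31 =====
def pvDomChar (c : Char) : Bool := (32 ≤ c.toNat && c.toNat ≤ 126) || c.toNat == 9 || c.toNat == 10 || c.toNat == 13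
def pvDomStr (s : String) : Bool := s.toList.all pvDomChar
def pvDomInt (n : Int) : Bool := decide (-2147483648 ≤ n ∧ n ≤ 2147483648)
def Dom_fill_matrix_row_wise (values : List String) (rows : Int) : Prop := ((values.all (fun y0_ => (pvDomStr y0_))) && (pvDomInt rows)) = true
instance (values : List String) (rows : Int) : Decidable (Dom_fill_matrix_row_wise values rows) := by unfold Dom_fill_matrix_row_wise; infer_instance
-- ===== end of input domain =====

-- B builds each row directly as a padded slice of the value list instead of scattering
-- every value into a pre-allocated all-'' matrix by idx//cols, idx%cols (objective: simpler).

-- ===== PORT A =====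
-- matrix[row][col] = val : pySetD/pyGetD are exact for the in-range indices Pre_ admits
-- (Python raises on an out-of-range write; Pre_ excludes exactly those inputs).
def fill_matrix_row_wise (values : List String) (rows : Int) : List (List String) :=
  let cols := PySem.Int.floordiv ((values.length : Int) + rows - 1) rows
  let matrix := (List.range rows.toNat).map (fun _ => (List.range cols.toNat).map (fun _ => ""))
  (PySem.List.enumerate values 0).foldl
    (fun m p =>
      let row := PySem.Int.floordiv p.1 cols
      let col := PySem.Int.mod p.1 cols
      PySem.List.pySetD m row (PySem.List.pySetD (PySem.List.pyGetD m row []) col p.2))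
    matrix

-- ===== PORT B =====
def fill_matrix_row_wise_alt (values : List String) (rows : Int) : List (List String) :=
  let cols := PySem.Int.floordiv ((values.length : Int) + rows - 1) rows
  (PySem.List.pyRange 0 rows 1).foldl
    (fun acc r =>
      let chunk := PySem.List.slice values (some (r * cols)) (some ((r + 1) * cols))
      acc ++ [chunk ++ List.replicate (cols - (chunk.length : Int)).toNat ""])
    []

-- ===== PRECONDITION & SPEC =====
-- Python A raises ZeroDivisionError when rows = 0 and IndexError when rows < 0 with a
-- non-empty value list (the matrix is then empty); Pre_ excludes exactly those inputs.
def Pre_fill_matrix_row_wise (values : List String) (rows : Int) : Prop :=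
  0 < rows ∨ (rows < 0 ∧ values = [])
instance (values : List String) (rows : Int) : Decidable (Pre_fill_matrix_row_wise values rows) := by unfold Pre_fill_matrix_row_wise; infer_instance
def pvWitness_fill_matrix_row_wise : List String × Int := (["a", "b", "c"], 2)

def Spec_fill_matrix_row_wise (values : List String) (rows : Int) (out : List (List String)) : Prop := out = fill_matrix_row_wise_alt values rows
instance (values : List String) (rows : Int) (out : List (List String)) : Decidable (Spec_fill_matrix_row_wise values rows out) := by unfold Spec_fill_matrix_row_wise; infer_instance

-- ===== CLAIM (what is proved, stated in full; the proofs are below) =====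
def Claim_equal_fill_matrix_row_wise : Prop := ∀ (values : List String) (rows : Int), Dom_fill_matrix_row_wise values rows → Pre_fill_matrix_row_wise values rows → Spec_fill_matrix_row_wise values rows (fill_matrix_row_wise values rows)

-- ===== LEMMAS AND PROOFS =====

-- the common closed form both ports are reduced to
def rowSpec (values : List String) (C r : Nat) : List String :=
  (List.range C).map (fun c => values.getD (r * C + c) "")

def matSpec (values : List String) (R C : Nat) : List (List String) :=
  (List.range R).map (fun r => rowSpec values C r)

lemma getD_snoc (vs : List String) (v : String) (k : Nat) (d : String) :
    (vs ++ [v]).getD k d = if k = vs.length then v else vs.getD k d := by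
  by_cases h : k = vs.length
  · subst h
    simp [List.getD_eq_getElem?_getD]
  · rw [if_neg h]
    rcases Nat.lt_or_ge k vs.length with hk | hk
    · simp [List.getD_eq_getElem?_getD, List.getElem?_append_left hk]
    · have hk1 : vs.length < k := by omega
      rw [List.getD_eq_getElem?_getD, List.getD_eq_getElem?_getD,
        List.getElem?_eq_none (l := vs) (by omega),
        List.getElem?_append_right hk,
        List.getElem?_eq_none (l := [v]) (by simp; omega)]

lemma take_pad_eq_rowSpec (values : List String) (C a : Nat) :
    (values.drop a).take C ++ List.replicate (C - ((values.drop a).take C).length) "" =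
      (List.range C).map (fun c => values.getD (a + c) "") := by
  apply List.ext_getElem
  · simp only [List.length_append, List.length_take, List.length_drop,
      List.length_replicate, List.length_map, List.length_range]
    omega
  · intro i h1 h2
    simp only [List.length_append, List.length_take, List.length_drop,
      List.length_replicate] at h1
    have hiC : i < C := by simp at h2; omega
    by_cases hin : a + i < values.length
    · have hlt : i < ((values.drop a).take C).length := by
        simp [List.length_take, List.length_drop]; omega
      rw [List.getElem_append_left hlt]
      simp [List.getElem_take, List.getElem_drop, List.getD_eq_getElem?_getD,
        List.getElem?_eq_getElem hin]
    · have hge : ((values.drop a).take C).length ≤ i := by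
        simp [List.length_take, List.length_drop]; omega
      rw [List.getElem_append_right hge]
      simp [List.getD_eq_getElem?_getD, List.getElem?_eq_none (by omega : values.length ≤ a + i)]

-- B on positive rows equals the closed form (C is rows' ceiling-division column count).
lemma alt_eq (values : List String) (R C : Nat)
    (hC : PySem.Int.floordiv ((values.length : Int) + (R : Int) - 1) (R : Int) = (C : Int)) :
    fill_matrix_row_wise_alt values (R : Int) = matSpec values R C := by
  unfold fill_matrix_row_wise_alt matSpec
  rw [hC]
  rw [show PySem.List.pyRange 0 (R : Int) 1 = (List.range R).map Int.ofNat by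
    rw [PySem.List.pyRange_one]; simp]
  rw [List.foldl_map, PySem.List.foldl_append_singleton_eq_map]
  simp only [List.nil_append, Int.ofNat_eq_natCast]
  apply List.map_congr_left
  intro r _
  have h1 : ((r : Int)) * (C : Int) = ((r * C : Nat) : Int) := (Nat.cast_mul r C).symm
  have h2 : ((r : Int) + 1) * (C : Int) = ((r * C : Nat) : Int) + ((C : Nat) : Int) := by
    push_cast
    ring
  rw [h1, h2, PySem.List.slice_natCast_add]
  have hlen : (((values.drop (r * C)).take C).length : Int) ≤ (C : Int) := by
    simp [List.length_take]
  rw [show ((C : Int) - (((values.drop (r * C)).take C).length : Int)).toNat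
        = C - ((values.drop (r * C)).take C).length by omega]
  exact take_pad_eq_rowSpec values C (r * C)

-- one scatter step of A, written with Nat index k and column count C
def scatterStep (C : Nat) (m : List (List String)) (p : Int × String) : List (List String) :=
  PySem.List.pySetD m (PySem.Int.floordiv p.1 (C : Int))
    (PySem.List.pySetD (PySem.List.pyGetD m (PySem.Int.floordiv p.1 (C : Int)) [])
      (PySem.Int.mod p.1 (C : Int)) p.2)

lemma matSpec_getElem (values : List String) (R C r : Nat) (hr : r < R) :
    (matSpec values R C)[r]'(by simpa [matSpec]) = rowSpec values C r := by
  simp [matSpec]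

lemma scatter_spec (vs : List String) (R C : Nat) (hC : 0 < C) (hn : vs.length ≤ R * C) :
    (PySem.List.enumerate vs 0).foldl (scatterStep C) (matSpec [] R C) = matSpec vs R C := by
  induction vs using List.reverseRecOn with
  | nil => rfl
  | append_singleton vs v ih =>
    have hlt : vs.length < R * C := by
      have := hn; simp only [List.length_append, List.length_singleton] at this; omega
    have hn' : vs.length ≤ R * C := by omega
    rw [PySem.List.enumerate_append, List.foldl_append, ih hn']
    simp only [PySem.List.enumerate_cons, PySem.List.enumerate_nil, List.foldl_cons,
      List.foldl_nil, zero_add]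
    set n := vs.length with hndef
    have hq : n / C < R := Nat.div_lt_of_lt_mul (by rw [Nat.mul_comm]; omega)
    have hdm := Nat.div_add_mod n C
    rw [Nat.mul_comm] at hdm
    have hmC := Nat.mod_lt n hC
    unfold scatterStep
    simp only [PySem.Int.floordiv_natCast, PySem.Int.mod_natCast,
      PySem.List.pySetD_natCast, PySem.List.pyGetD_natCast]
    have hget : (matSpec vs R C).getD (n / C) [] = rowSpec vs C (n / C) := by
      simp [matSpec, List.getD_eq_getElem?_getD, List.getElem?_map,
        List.getElem?_range hq]
    rw [hget]
    -- now prove the set-update equals matSpec (vs ++ [v]) R C elementwise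
    apply List.ext_getElem
    · simp [matSpec]
    · intro r hr1 hr2
      have hrR : r < R := by simpa [matSpec] using hr2
      rw [List.getElem_set]
      rw [matSpec_getElem (vs ++ [v]) R C r hrR]
      by_cases hreq : n / C = r
      · simp only [if_pos hreq]
        subst hreq
        unfold rowSpec
        apply List.ext_getElem
        · simp
        · intro c hc1 hc2
          have hcC : c < C := by simpa using hc2
          rw [List.getElem_set]
          simp only [List.getElem_map, List.getElem_range]
          rw [getD_snoc]
          by_cases hceq : n % C = c
          · have hEq : n / C * C + c = n := by rw [← hceq]; exact hdm
            simp [hceq, hEq, ← hndef]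
          · have hne : ¬ (n / C * C + c = n) := by
              intro h
              exact hceq (Nat.add_left_cancel (hdm.trans h.symm))
            simp [hceq, hne, ← hndef]
      · simp only [if_neg hreq]
        rw [matSpec_getElem vs R C r hrR]
        unfold rowSpec
        apply List.map_congr_left
        intro c hc
        have hcC : c < C := List.mem_range.mp hc
        rw [getD_snoc]
        have hne : ¬ (r * C + c = n) := by
          intro h
          apply hreq
          rw [← h, show r * C + c = c + C * r by ring,
            Nat.add_mul_div_left c r hC, Nat.div_eq_of_lt hcC, Nat.zero_add]
        simp [hne, ← hndef]

-- A on positive rows equals the closed form.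
lemma a_eq (values : List String) (R C : Nat)
    (hC : PySem.Int.floordiv ((values.length : Int) + (R : Int) - 1) (R : Int) = (C : Int))
    (hC0 : 0 < C) (hn : values.length ≤ R * C) :
    fill_matrix_row_wise values (R : Int) = matSpec values R C := by
  unfold fill_matrix_row_wise
  rw [hC]
  exact scatter_spec values R C hC0 hn

lemma cols_spec (n R : Nat) (hR : 0 < R) :
    PySem.Int.floordiv ((n : Int) + (R : Int) - 1) (R : Int) = (((n + R - 1) / R : Nat) : Int) := by
  rw [show (n : Int) + (R : Int) - 1 = ((n + R - 1 : Nat) : Int) by omega]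
  exact PySem.Int.floordiv_natCast _ _

-- ===== VERDICT (by name: the statement is the Claim_ definition above) =====
theorem fill_matrix_row_wise_spec : Claim_equal_fill_matrix_row_wise := by
  intro values rows _ hpre
  unfold Spec_fill_matrix_row_wise
  rcases hpre with hpos | ⟨hneg, hnil⟩
  · -- rows > 0
    lift rows to Nat using (by omega : (0:Int) ≤ rows) with R
    have hR : 0 < R := by exact_mod_cast hpos
    set n := values.length with hndef
    set C := (n + R - 1) / R with hCdef
    have hC := cols_spec n R hR
    by_cases hn0 : n = 0
    · have hvnil : values = [] := List.length_eq_zero_iff.mp hn0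
      subst hvnil
      have hC0 : C = 0 := by
        rw [hCdef]; simp at hndef ⊢; omega
      rw [alt_eq [] R C (by rw [← hndef]; exact hC)]
      unfold fill_matrix_row_wise
      rw [show PySem.Int.floordiv (((([] : List String)).length : Int) + (R : Int) - 1) (R : Int) = (C : Int) by rw [← hndef]; exact hC]
      simp [PySem.List.enumerate_nil, matSpec, rowSpec, List.getD]
    · have hC0 : 0 < C := by
        rw [hCdef]
        have : R ≤ n + R - 1 := by omega
        exact Nat.one_le_div_iff hR |>.mpr this
      have hn : n ≤ R * C := by
        have hdm := Nat.div_add_mod (n + R - 1) R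
        have hmR : (n + R - 1) % R < R := Nat.mod_lt _ hR
        rw [← hCdef] at hdm
        generalize R * C = A at hdm ⊢
        omega
      rw [a_eq values R C (by rw [← hndef]; exact hC) hC0 hn,
        alt_eq values R C (by rw [← hndef]; exact hC)]
  · -- rows < 0, values = []
    subst hnil
    unfold fill_matrix_row_wise fill_matrix_row_wise_alt
    have h1 : rows.toNat = 0 := by omega
    rw [PySem.List.pyRange_one_eq_nil (by omega)]
    simp [h1, PySem.List.enumerate_nil]
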